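-- pv_equiv track=rewrite | github.com/Jianxun/ASDL | src/asdl/emit/netlist/verify.py | _preview_names
-- ===== SOURCE A (Python) =====
-- from typing import Iterable, List, Optional, Tuple
--
-- def _preview_names(names: Iterable[str], limit: int) -> Tuple[List[str], bool]:
--     """Collect a preview list of names up to a limit.
--
--     Args:
--         names: Iterable of names to preview.
--         limit: Maximum number of names to return.
--
--     Returns:
--         Tuple of previewed names and a flag indicating remaining items.
--     """
--     preview: List[str] = []
--     iterator = iter(names)
--     for _ in range(limit):
--         try:
--             preview.append(next(iterator))
--         except StopIteration:
--             return preview, False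
--     has_more = next(iterator, None) is not None
--     return preview, has_more
-- ===== SOURCE B (Python) =====
-- from typing import Iterable, List, Tuple
--
-- def _preview_names(names: Iterable[str], limit: int) -> Tuple[List[str], bool]:
--     items = list(names)
--     n = max(limit, 0)
--     return items[:n], len(items) > n
-- ===== Notes on version B (the rewrite author's own statement) =====
-- stated objective: simpler
-- what changed: Materialises the whole iterable once and answers with a slice and a length comparison, replacing the counted append loop with try/except early-exit and the separate one-item peek.
import Mathlib
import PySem

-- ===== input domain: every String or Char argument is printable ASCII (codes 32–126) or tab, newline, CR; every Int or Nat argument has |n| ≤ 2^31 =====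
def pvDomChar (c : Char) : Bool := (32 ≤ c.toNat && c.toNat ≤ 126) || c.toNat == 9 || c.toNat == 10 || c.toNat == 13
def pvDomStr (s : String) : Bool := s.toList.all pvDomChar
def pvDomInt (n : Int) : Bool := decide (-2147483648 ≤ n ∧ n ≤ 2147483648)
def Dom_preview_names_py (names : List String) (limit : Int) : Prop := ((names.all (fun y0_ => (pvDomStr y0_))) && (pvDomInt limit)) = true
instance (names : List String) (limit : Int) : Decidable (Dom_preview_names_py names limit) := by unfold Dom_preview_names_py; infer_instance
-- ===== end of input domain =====

-- B materialises the iterable once and answers with a slice and a length comparison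
-- instead of A's counted append loop with try/except early-exit plus a one-item peek (simpler).

-- ===== PORT A =====
-- A's for-loop over range(limit): state (preview, iterator); third component = early return taken
def previewLoopA : List String → List String → Nat → List String × List String × Bool
  | preview, it, 0 => (preview, it, false)
  | preview, it, k + 1 =>
    match it with
    | [] => (preview, [], true)            -- StopIteration: return preview, False
    | x :: rest => previewLoopA (preview ++ [x]) rest k

def preview_names_py (names : List String) (limit : Int) : List String × Bool :=
  match previewLoopA [] names limit.toNat with   -- range(limit) is empty for limit ≤ 0
  | (preview, _, true) => (preview, false)
  | (preview, it, false) =>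
    (preview, it.head?.isSome)                   -- has_more = next(iterator, None) is not None

-- ===== PORT B =====
def preview_names_py_alt (names : List String) (limit : Int) : List String × Bool :=
  let items := names                             -- items = list(names)
  let n : Int := max limit 0                     -- n = max(limit, 0)
  (PySem.List.slice items none (some n),         -- items[:n]
   decide ((items.length : Int) > n))            -- len(items) > n

-- ===== PRECONDITION & SPEC =====
def Spec_preview_names_py (names : List String) (limit : Int) (out : List String × Bool) : Prop := out = preview_names_py_alt names limit
instance (names : List String) (limit : Int) (out : List String × Bool) : Decidable (Spec_preview_names_py names limit out) := by unfold Spec_preview_names_py; infer_instance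

-- ===== CLAIM (what is proved, stated in full; the proofs are below) =====
def Claim_equal_preview_names_py : Prop := ∀ (names : List String) (limit : Int), Dom_preview_names_py names limit → Spec_preview_names_py names limit (preview_names_py names limit)

-- ===== LEMMAS AND PROOFS =====

theorem previewLoopA_spec (it : List String) (p : List String) (k : Nat) :
    previewLoopA p it k =
      if it.length < k then (p ++ it, [], true)
      else (p ++ it.take k, it.drop k, false) := by
  induction k generalizing p it with
  | zero => simp [previewLoopA]
  | succ k ih =>
    cases it with
    | nil => simp [previewLoopA]
    | cons x rest =>
      simp only [previewLoopA, ih, List.length_cons, List.take_succ_cons,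
        List.drop_succ_cons, List.append_assoc, List.singleton_append]
      split_ifs <;> first | rfl | omega

-- ===== VERDICT (by name: the statement is the Claim_ definition above) =====
theorem preview_names_py_spec : Claim_equal_preview_names_py := by
  intro names limit _
  unfold Spec_preview_names_py preview_names_py preview_names_py_alt
  have hn : max limit 0 = ((limit.toNat : Nat) : Int) := by omega
  simp only [hn, PySem.List.slice_to_natCast]
  set n := limit.toNat with hdef
  rw [previewLoopA_spec]
  by_cases h : names.length < n
  · simp [h, List.take_of_length_le (le_of_lt h)]
    omega
  · have h' : n ≤ names.length := Nat.le_of_not_lt h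
    simp only [if_neg h, List.nil_append]
    by_cases h2 : names.length = n
    · simp [h2, List.drop_eq_nil_of_le]
    · have hlt : n < names.length := by omega
      simp [List.head?_drop, List.getElem?_eq_getElem hlt]
      omega
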